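-- pv_equiv track=rewrite | github.com/CSOS-Study/Python_Algorithm | 백준 단계별로 풀어보기/10. 재귀/3. 별 찍기 - 10/강문영.py | stars
-- ===== SOURCE A (Python) =====
-- def stars(n):
--     arr = []
--     for i in range(3 * len(n)):
--         if i // len(n) == 1:
--             arr.append(n[i % len(n)] + " " * len(n) + n[i % len(n)])
--         else:
--             arr.append(n[i % len(n)] * 3)
--     return (list(arr))
-- ===== SOURCE B (Python) =====
-- def stars(n):
--     L = len(n)
--     top = [row * 3 for row in n]
--     mid = [row + " " * L + row for row in n]
--     return top + mid + top
-- ===== Notes on version B (the rewrite author's own statement) =====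
-- stated objective: simpler
-- what changed: Replaces the single range(3*len(n)) loop with i//len and i%len index arithmetic and a branch by three structure-aligned comprehensions over the rows themselves (top, mid, top) concatenated.
import Mathlib
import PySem

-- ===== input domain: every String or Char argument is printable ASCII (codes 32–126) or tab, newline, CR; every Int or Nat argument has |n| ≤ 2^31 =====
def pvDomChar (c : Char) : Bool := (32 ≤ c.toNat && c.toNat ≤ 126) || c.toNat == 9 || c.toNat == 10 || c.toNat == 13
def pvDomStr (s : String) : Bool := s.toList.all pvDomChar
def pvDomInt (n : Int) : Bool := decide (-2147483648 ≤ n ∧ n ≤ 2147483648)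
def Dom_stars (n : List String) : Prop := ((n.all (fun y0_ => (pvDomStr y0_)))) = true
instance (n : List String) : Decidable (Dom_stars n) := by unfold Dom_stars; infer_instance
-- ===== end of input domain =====

-- B replaces A's single modular-indexed loop (i//len, i%len, branch) by three
-- structure-aligned comprehensions over the rows (top, mid, top) concatenated: simpler.

-- shared string primitives (Python '+' and '*' on str, exact on code points; kernel-transparent)
def strCat (a b : String) : String := String.ofList (a.toList ++ b.toList)
def strMul (s : String) (k : Int) : String := String.ofList (PySem.List.pyRepeat s.toList k)

-- ===== PORT A =====
def stars (n : List String) : List String :=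
  (PySem.List.pyRange 0 (3 * (n.length : Int)) 1).foldl
    (fun arr i =>
      if PySem.Int.floordiv i n.length == 1 then
        arr ++ [strCat (strCat (PySem.List.pyGetD n (PySem.Int.mod i n.length) "")
                               (strMul " " n.length))
                       (PySem.List.pyGetD n (PySem.Int.mod i n.length) "")]
      else
        arr ++ [strMul (PySem.List.pyGetD n (PySem.Int.mod i n.length) "") 3]) []

-- ===== PORT B =====
def stars_alt (n : List String) : List String :=
  let L : Int := n.length
  let top := n.map (fun row => strMul row 3)
  let mid := n.map (fun row => strCat (strCat row (strMul " " L)) row)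
  top ++ mid ++ top

-- ===== PRECONDITION & SPEC =====
def Spec_stars (n : List String) (out : List String) : Prop := out = stars_alt n
instance (n : List String) (out : List String) : Decidable (Spec_stars n out) := by unfold Spec_stars; infer_instance

-- ===== CLAIM (what is proved, stated in full; the proofs are below) =====
def Claim_equal_stars : Prop := ∀ (n : List String), Dom_stars n → Spec_stars n (stars n)

-- ===== LEMMAS AND PROOFS =====

theorem stars_eq (n : List String) : stars n = stars_alt n := by
  unfold stars stars_alt
  have hbody :
      (fun (arr : List String) (i : Int) =>
        if PySem.Int.floordiv i n.length == 1 then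
          arr ++ [strCat (strCat (PySem.List.pyGetD n (PySem.Int.mod i n.length) "")
                                 (strMul " " n.length))
                         (PySem.List.pyGetD n (PySem.Int.mod i n.length) "")]
        else
          arr ++ [strMul (PySem.List.pyGetD n (PySem.Int.mod i n.length) "") 3]) =
      (fun (arr : List String) (i : Int) =>
        arr ++ [if PySem.Int.floordiv i n.length == 1 then
          strCat (strCat (PySem.List.pyGetD n (PySem.Int.mod i n.length) "")
                         (strMul " " n.length))
                 (PySem.List.pyGetD n (PySem.Int.mod i n.length) "")
        else strMul (PySem.List.pyGetD n (PySem.Int.mod i n.length) "") 3]) := by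
    funext arr i; split <;> rfl
  rw [hbody, PySem.List.foldl_append_singleton_eq_map, List.nil_append]
  have h3 : (3 * (n.length : Int)) = ((3 * n.length : Nat) : Int) := by push_cast; ring
  rw [h3, PySem.List.pyRange_zero_natCast, List.map_map]
  apply List.ext_getElem
  · simp; ring
  · intro k hk hk'
    simp only [List.length_map, List.length_range] at hk
    simp only [Function.comp, List.getElem_map, List.getElem_range]
    rw [PySem.Int.floordiv_natCast, PySem.Int.mod_natCast, PySem.List.pyGetD_natCast]
    have hL0 : 0 < n.length := by omega
    simp only [List.append_assoc]
    rcases Nat.lt_or_ge k n.length with hcase | hcase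
    · -- top block
      have hdiv : k / n.length = 0 := Nat.div_eq_of_lt hcase
      have hmod : k % n.length = k := Nat.mod_eq_of_lt hcase
      rw [hdiv, hmod, List.getElem_append_left (by simpa using hcase), List.getElem_map]
      simp [List.getElem?_eq_getElem hcase]
    · rcases Nat.lt_or_ge k (2 * n.length) with hcase2 | hcase2
      · -- middle block
        have hdiv : k / n.length = 1 := Nat.div_eq_of_lt_le (by omega) (by omega)
        have hmod : k % n.length = k - n.length := by
          rw [Nat.mod_eq_sub_mod hcase, Nat.mod_eq_of_lt (by omega)]
        rw [hdiv, hmod, List.getElem_append_right (by simpa using hcase)]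
        simp only [List.length_map]
        rw [List.getElem_append_left (by simp; omega), List.getElem_map]
        simp [List.getElem?_eq_getElem (show k - n.length < n.length by omega)]
      · -- bottom block
        have hdiv : k / n.length = 2 := Nat.div_eq_of_lt_le (by omega) (by omega)
        have hmod : k % n.length = k - n.length - n.length := by
          rw [Nat.mod_eq_sub_mod hcase, Nat.mod_eq_sub_mod (by omega),
              Nat.mod_eq_of_lt (by omega)]
        rw [hdiv, hmod, List.getElem_append_right (by simpa using hcase)]
        simp only [List.length_map]
        rw [List.getElem_append_right (by simp; omega), List.getElem_map]
        simp [List.getElem?_eq_getElem (show k - n.length - n.length < n.length by omega)]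

-- ===== VERDICT (by name: the statement is the Claim_ definition above) =====
theorem stars_spec : Claim_equal_stars := by
  intro n _
  unfold Spec_stars
  exact stars_eq n
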